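-- pv_equiv track=rewrite | github.com/DYefremov/DemonEditor | app/ui/xml/dialogs.py | get_grouped_satellite_name
-- ===== SOURCE A (Python) =====
-- from itertools import groupby
--
-- def get_grouped_satellite_name(sat_names, pos):
--     """ Forms name for merged satellites. """
--
--     def name_grouper(nd):
--         if nd:
--             return nd[0]
--         return ""
--
--     name_groups = groupby(sorted(sat_names, key=name_grouper), key=name_grouper)
--     names = []
--     for s, s_names in name_groups:
--         tk = set()
--         name = s
--         for i, n_data in enumerate(s_names):
--             if i == 0:
--                 name = " ".join(n_data)
--                 tk.update(n_data)
--             else: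
--                 for n in n_data:
--                     if n in tk:
--                         continue
--                     name = f"{name}/{n}"
--                     tk.add(n)
--
--         names.append(name)
--
--     return f"{pos} {' & '.join(names)}"
-- ===== SOURCE B (Python) =====
-- def get_grouped_satellite_name(sat_names, pos):
--     """ Forms name for merged satellites (declarative flatten/dedup/filter formulation). """
--
--     def key(nd):
--         return nd[0] if nd else ""
--
--     parts = []
--     for k in sorted({key(nd) for nd in sat_names}):
--         group = [nd for nd in sat_names if key(nd) == k]
--         first = group[0]
--         exclude = set(first)
--         rest = [t for nd in group[1:] for t in nd]
--         extras = [t for t in dict.fromkeys(rest) if t not in exclude]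
--         parts.append("/".join([" ".join(first)] + extras))
--     return f"{pos} {' & '.join(parts)}"
-- ===== Notes on version B (the rewrite author's own statement) =====
-- stated objective: alternative
-- what changed: Replaces A's sort-then-groupby pipeline and its incremental seen-set string building by a declarative formulation: iterate sorted distinct first tokens, select each group by filtering, and form the group string as '/'.join of the space-joined first tuple plus the order-preserving dedup (dict.fromkeys) of the remaining tuples' flattened tokens filtered against the first tuple's token set.
import Mathlib
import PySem

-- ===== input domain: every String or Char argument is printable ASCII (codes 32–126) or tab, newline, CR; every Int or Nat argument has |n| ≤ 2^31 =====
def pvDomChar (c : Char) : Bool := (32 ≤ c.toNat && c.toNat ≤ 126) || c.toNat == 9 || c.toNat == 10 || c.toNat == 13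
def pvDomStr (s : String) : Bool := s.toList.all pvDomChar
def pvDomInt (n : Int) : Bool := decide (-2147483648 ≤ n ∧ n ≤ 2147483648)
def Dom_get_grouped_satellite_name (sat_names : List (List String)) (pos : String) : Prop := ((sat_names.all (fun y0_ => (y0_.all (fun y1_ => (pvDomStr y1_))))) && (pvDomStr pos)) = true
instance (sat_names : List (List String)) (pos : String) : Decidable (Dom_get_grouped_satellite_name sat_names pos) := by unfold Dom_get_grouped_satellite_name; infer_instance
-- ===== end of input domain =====

-- ===== PORT A =====
-- B forms each group string declaratively (flatten + ordered dedup + filter + one join) over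
-- groups selected by filtering per sorted distinct first token, instead of A's sort+groupby
-- pipeline with incremental seen-set string building; return value only, no mutation.

-- name_grouper (A's nested helper)
def pvNameGrouper (nd : List String) : String :=
  match nd with
  | [] => ""          -- 'if nd:' false
  | h :: _ => h       -- nd[0]

-- itertools.groupby with key pvNameGrouper: consecutive runs of equal keys
def pvGroupbyA : List (List String) → List (String × List (List String))
  | [] => []
  | x :: xs =>
      (pvNameGrouper x, x :: xs.takeWhile (fun y => pvNameGrouper y == pvNameGrouper x)) ::
        pvGroupbyA (xs.dropWhile (fun y => pvNameGrouper y == pvNameGrouper x))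
termination_by l => l.length
decreasing_by
  simp only [List.length_cons]
  exact Nat.lt_succ_of_le (List.length_dropWhile_le _ _)

-- the body of A's 'for s, s_names in name_groups' loop: one group's name
def pvGroupNameA (s : String) (s_names : List (List String)) : String :=
  ((PySem.List.enumerate s_names 0).foldl
    (fun (st : String × PySem.Set String) p =>
      if p.1 == 0 then
        (PySem.Str.join " " p.2, PySem.Set.update PySem.Set.empty p.2)
      else
        p.2.foldl (fun (st2 : String × PySem.Set String) n =>
          if PySem.Set.contains st2.2 n then st2
          else (st2.1 ++ "/" ++ n, PySem.Set.add st2.2 n)) st)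
    (s, PySem.Set.empty)).1

def get_grouped_satellite_name (sat_names : List (List String)) (pos : String) : String :=
  let name_groups := pvGroupbyA (PySem.List.sorted sat_names pvNameGrouper false)
  let names := name_groups.foldl (fun acc g => acc ++ [pvGroupNameA g.1 g.2]) []
  pos ++ " " ++ PySem.Str.join " & " names

-- ===== PORT B =====

-- key (B's nested helper)
def pvKeyB (nd : List String) : String :=
  match nd with
  | [] => ""
  | h :: _ => h

-- one group's display string: '/'.join of the space-joined first tuple and the deduped,
-- first-tuple-filtered tokens of the remaining tuples
def pvGroupNameB (group : List (List String)) : String :=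
  match group with
  | [] => ""          -- unreachable: every emitted key has a nonempty group
  | first :: rest0 =>
      let exclude := PySem.Set.ofList first
      let rest := rest0.flatMap (fun nd => nd)
      let extras := (PySem.List.dedup rest).filter (fun t => ! PySem.Set.contains exclude t)
      PySem.Str.join "/" (PySem.Str.join " " first :: extras)

def get_grouped_satellite_name_alt (sat_names : List (List String)) (pos : String) : String :=
  let parts := (PySem.List.sorted (PySem.Set.ofList (sat_names.map pvKeyB)) (fun q => q) false).foldl
      (fun acc k => acc ++ [pvGroupNameB (sat_names.filter (fun nd => pvKeyB nd == k))]) []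
  pos ++ " " ++ PySem.Str.join " & " parts

-- ===== PRECONDITION & SPEC =====
def Spec_get_grouped_satellite_name (sat_names : List (List String)) (pos : String) (out : String) : Prop := out = get_grouped_satellite_name_alt sat_names pos
instance (sat_names : List (List String)) (pos : String) (out : String) : Decidable (Spec_get_grouped_satellite_name sat_names pos out) := by unfold Spec_get_grouped_satellite_name; infer_instance

-- ===== CLAIM (what is proved, stated in full; the proofs are below) =====
def Claim_equal_get_grouped_satellite_name : Prop := ∀ (sat_names : List (List String)) (pos : String), Dom_get_grouped_satellite_name sat_names pos → Spec_get_grouped_satellite_name sat_names pos (get_grouped_satellite_name sat_names pos)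

-- ===== LEMMAS AND PROOFS =====

-- the two nested key helpers compute the same token
lemma pv_tok_eq : pvKeyB = pvNameGrouper := by
  funext nd; cases nd <;> rfl

-- per-key bucket of xs, and the sorted distinct-key list of xs
def pvF (xs : List (List String)) (q : String) : List (List String) :=
  xs.filter (fun nd => pvNameGrouper nd == q)

def pvK (xs : List (List String)) : List String :=
  PySem.List.sorted (PySem.Set.ofList (xs.map pvNameGrouper)) (fun q => q) false

lemma pv_mem_K (xs : List (List String)) (q : String) :
    q ∈ pvK xs ↔ q ∈ xs.map pvNameGrouper := by
  unfold pvK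
  rw [List.Perm.mem_iff (PySem.List.sorted_perm _ _ _)]
  exact PySem.Set.mem_ofList _ _

lemma pv_K_pairwise (xs : List (List String)) : (pvK xs).Pairwise (· < ·) :=
  PySem.List.sorted_ofList_pairwise_lt _

lemma pv_hkey (xs : List (List String)) (q : String) :
    ∀ nd ∈ pvF xs q, pvNameGrouper nd = q := by
  intro nd hnd
  have := List.of_mem_filter hnd
  simpa using this

lemma pv_hne (xs : List (List String)) (q : String) (hq : q ∈ pvK xs) : pvF xs q ≠ [] := by
  rw [pv_mem_K] at hq
  obtain ⟨nd, hnd, hk⟩ := List.mem_map.1 hq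
  exact List.ne_nil_of_mem (List.mem_filter.2 ⟨hnd, by simp [hk]⟩)

lemma pv_hF0 (xs : List (List String)) (q : String) (hq : q ∉ pvK xs) : pvF xs q = [] := by
  rw [pv_mem_K] at hq
  refine List.filter_eq_nil_iff.2 (fun nd hnd => ?_)
  simp only [beq_iff_eq]
  exact fun e => hq (List.mem_map.2 ⟨nd, hnd, e⟩)

-- ordered insertion of a key into a strictly sorted key list
def pvInsertKey (kx : String) : List String → List String
  | [] => [kx]
  | q :: K => if kx < q then kx :: q :: K else if kx = q then q :: K else q :: pvInsertKey kx K

lemma pvInsertKey_cons (kx q : String) (K : List String) :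
    pvInsertKey kx (q :: K)
      = if kx < q then kx :: q :: K else if kx = q then q :: K else q :: pvInsertKey kx K := rfl

lemma pv_flatMap_congr (l : List String) (f g : String → List (List String))
    (h : ∀ a ∈ l, f a = g a) : l.flatMap f = l.flatMap g := by
  simp only [List.flatMap]
  rw [List.map_congr_left h]

lemma pv_mem_insertKey (kx r : String) (K : List String) :
    r ∈ pvInsertKey kx K ↔ r = kx ∨ r ∈ K := by
  induction K with
  | nil => simp [pvInsertKey]
  | cons q K ih =>
    rw [pvInsertKey_cons]
    split_ifs with h1 h2
    · simp only [List.mem_cons]; try tauto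
    · subst h2; simp only [List.mem_cons]; try tauto
    · simp only [List.mem_cons, ih]; try tauto

lemma pv_insertKey_pairwise (kx : String) (K : List String) (hp : K.Pairwise (· < ·)) :
    (pvInsertKey kx K).Pairwise (· < ·) := by
  induction K with
  | nil => simp [pvInsertKey]
  | cons q K ih =>
    rw [List.pairwise_cons] at hp
    obtain ⟨hq, hp'⟩ := hp
    rw [pvInsertKey_cons]
    rcases lt_trichotomy kx q with hlt | heq | hgt
    · rw [if_pos hlt]
      refine List.pairwise_cons.2 ⟨?_, List.pairwise_cons.2 ⟨hq, hp'⟩⟩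
      intro r hr
      rcases List.mem_cons.1 hr with h | h
      · exact lt_of_lt_of_eq hlt h.symm
      · exact lt_trans hlt (hq r h)
    · rw [if_neg (heq ▸ lt_irrefl kx), if_pos heq]
      exact List.pairwise_cons.2 ⟨hq, hp'⟩
    · rw [if_neg (not_lt.2 hgt.le), if_neg (ne_of_gt hgt)]
      refine List.pairwise_cons.2 ⟨?_, ih hp'⟩
      intro r hr
      rcases (pv_mem_insertKey kx r K).1 hr with h | h
      · exact lt_of_lt_of_eq hgt h.symm
      · exact hq r h

lemma pv_insertKey_perm (kx : String) (K : List String) (hp : K.Pairwise (· < ·)) :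
    (pvInsertKey kx K).Perm (if kx ∈ K then K else K ++ [kx]) := by
  induction K with
  | nil => simp [pvInsertKey]
  | cons q K ih =>
    rw [List.pairwise_cons] at hp
    obtain ⟨hq, hp'⟩ := hp
    rw [pvInsertKey_cons]
    rcases lt_trichotomy kx q with hlt | heq | hgt
    · have hnot : kx ∉ q :: K := by
        intro h
        rcases List.mem_cons.1 h with h | h
        · exact absurd (h ▸ hlt) (lt_irrefl _)
        · exact absurd hlt (not_lt.2 (hq kx h).le)
      rw [if_pos hlt, if_neg hnot]
      exact (List.perm_append_singleton kx (q :: K)).symm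
    · subst heq
      simp
    · rw [if_neg (not_lt.2 hgt.le), if_neg (ne_of_gt hgt)]
      by_cases hin : kx ∈ K
      · rw [if_pos (List.mem_cons_of_mem q hin)]
        have hih := ih hp'
        rw [if_pos hin] at hih
        exact hih.cons q
      · have hnot : kx ∉ q :: K := by
          intro h
          rcases List.mem_cons.1 h with h | h
          · exact absurd h (ne_of_gt hgt)
          · exact hin h
        rw [if_neg hnot]
        have hih := ih hp'
        rw [if_neg hin] at hih
        exact hih.cons q

lemma pv_insertBy_append_not_before (bef : List String → List String → Bool)
    (x : List String) (ys zs : List (List String)) (h : ∀ y ∈ ys, bef x y = false) :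
    PySem.List.insertBy bef x (ys ++ zs) = ys ++ PySem.List.insertBy bef x zs := by
  induction ys with
  | nil => rfl
  | cons y ys ih =>
    have hy : bef x y = false := h y (by simp)
    rw [List.cons_append]
    rw [show PySem.List.insertBy bef x (y :: (ys ++ zs))
          = y :: PySem.List.insertBy bef x (ys ++ zs) by
        simp [PySem.List.insertBy, hy]]
    rw [ih fun y hm => h y (by simp [hm])]
    rfl

lemma pv_insertBy_all_before (bef : List String → List String → Bool)
    (x : List String) (ys : List (List String)) (h : ∀ y ∈ ys, bef x y = true) :
    PySem.List.insertBy bef x ys = x :: ys := by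
  cases ys with
  | nil => rfl
  | cons y ys => simp [PySem.List.insertBy, h y (by simp)]

lemma pv_insertFlat (x : List String) (kx : String) (hx : pvNameGrouper x = kx)
    (K : List String) (F : String → List (List String))
    (hp : K.Pairwise (· < ·))
    (hne : ∀ q ∈ K, F q ≠ [])
    (hkey : ∀ q ∈ K, ∀ nd ∈ F q, pvNameGrouper nd = q)
    (hF0 : kx ∉ K → F kx = []) :
    PySem.List.insertBy (fun a b => decide (pvNameGrouper a < pvNameGrouper b)) x (K.flatMap F)
      = (pvInsertKey kx K).flatMap (fun q => if q = kx then F q ++ [x] else F q) := by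
  induction K with
  | nil =>
    have h0 : F kx = [] := hF0 (by simp)
    simp [pvInsertKey, PySem.List.insertBy, h0]
  | cons q K ih =>
    rw [List.pairwise_cons] at hp
    obtain ⟨hq, hp'⟩ := hp
    rcases lt_trichotomy kx q with hlt | heq | hgt
    · -- kx < q : x goes in front of everything
      have hall : ∀ y ∈ (q :: K).flatMap F, (decide (pvNameGrouper x < pvNameGrouper y)) = true := by
        intro y hy
        obtain ⟨r, hr, hyr⟩ := List.mem_flatMap.1 hy
        rw [hx, hkey r hr y hyr]
        rcases List.mem_cons.1 hr with h | h
        · exact decide_eq_true (lt_of_lt_of_eq hlt h.symm)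
        · exact decide_eq_true (lt_trans hlt (hq r h))
      rw [pv_insertBy_all_before _ _ _ hall]
      have hnot : kx ∉ q :: K := by
        intro h
        rcases List.mem_cons.1 h with h | h
        · exact absurd (h ▸ hlt) (lt_irrefl _)
        · exact absurd hlt (not_lt.2 (hq kx h).le)
      have h0 : F kx = [] := hF0 hnot
      have hGrest : ∀ r ∈ q :: K, (if r = kx then F r ++ [x] else F r) = F r := by
        intro r hr
        exact if_neg (fun (e : r = kx) => hnot (e ▸ hr))
      rw [pvInsertKey_cons, if_pos hlt]
      simp only [List.flatMap_cons, if_true]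
      rw [h0, List.nil_append, List.singleton_append]
      rw [show (if q = kx then F q ++ [x] else F q) = F q from hGrest q (by simp)]
      rw [pv_flatMap_congr K (fun r => if r = kx then F r ++ [x] else F r) F
            (fun r hr => hGrest r (by simp [hr]))]
    · -- kx = q : x goes at the end of q's bucket
      subst heq
      have hfq : ∀ y ∈ F kx, (decide (pvNameGrouper x < pvNameGrouper y)) = false := by
        intro y hy
        rw [hx, hkey kx (by simp) y hy]
        exact decide_eq_false (lt_irrefl kx)
      rw [List.flatMap_cons, pv_insertBy_append_not_before _ _ _ _ hfq]
      have hall : ∀ y ∈ K.flatMap F, (decide (pvNameGrouper x < pvNameGrouper y)) = true := by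
        intro y hy
        obtain ⟨r, hr, hyr⟩ := List.mem_flatMap.1 hy
        rw [hx, hkey r (by simp [hr]) y hyr]
        exact decide_eq_true (hq r hr)
      rw [pv_insertBy_all_before _ _ _ hall]
      have hGrest : ∀ r ∈ K, (if r = kx then F r ++ [x] else F r) = F r :=
        fun r hr => if_neg (ne_of_gt (hq r hr))
      rw [pvInsertKey_cons, if_neg (lt_irrefl kx), if_pos rfl]
      simp only [List.flatMap_cons, if_true]
      rw [pv_flatMap_congr _ _ _ hGrest]
      simp
    · -- q < kx : skip q's bucket, recurse
      have hfq : ∀ y ∈ F q, (decide (pvNameGrouper x < pvNameGrouper y)) = false := by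
        intro y hy
        rw [hx, hkey q (by simp) y hy]
        exact decide_eq_false (not_lt.2 hgt.le)
      rw [List.flatMap_cons, pv_insertBy_append_not_before _ _ _ _ hfq]
      have hne' : ∀ r ∈ K, F r ≠ [] := fun r hr => hne r (by simp [hr])
      have hkey' : ∀ r ∈ K, ∀ nd ∈ F r, pvNameGrouper nd = r := fun r hr => hkey r (by simp [hr])
      have hF0' : kx ∉ K → F kx = [] := by
        intro h
        refine hF0 (fun hmem => ?_)
        rcases List.mem_cons.1 hmem with h' | h'
        · exact absurd h' (ne_of_gt hgt)
        · exact h h'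
      rw [ih hp' hne' hkey' hF0']
      rw [pvInsertKey_cons, if_neg (not_lt.2 hgt.le), if_neg (ne_of_gt hgt)]
      simp only [List.flatMap_cons]
      rw [show (if q = kx then F q ++ [x] else F q) = F q from if_neg (ne_of_lt hgt)]

-- the stable sort, described as buckets in sorted-key order
lemma pv_sorted_flatMap (xs : List (List String)) :
    PySem.List.sorted xs pvNameGrouper false = (pvK xs).flatMap (pvF xs) := by
  induction xs using List.reverseRecOn with
  | nil => rfl
  | append_singleton xs x ih =>
    rw [PySem.List.sorted_eq_foldl_insertBy, List.foldl_append, List.foldl_cons, List.foldl_nil,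
        ← PySem.List.sorted_eq_foldl_insertBy, ih]
    rw [pv_insertFlat x (pvNameGrouper x) rfl (pvK xs) (pvF xs) (pv_K_pairwise xs) (pv_hne xs) (fun q _ => pv_hkey xs q) (pv_hF0 xs _)]
    -- identify the new key list
    have hK : pvK (xs ++ [x]) = pvInsertKey (pvNameGrouper x) (pvK xs) := by
      unfold pvK
      apply PySem.List.sorted_eq_of_perm_of_pairwise_lt
      · -- permutation with the new key set
        have hmap : (xs ++ [x]).map pvNameGrouper = xs.map pvNameGrouper ++ [pvNameGrouper x] := by
          simp
        rw [hmap]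
        rw [show PySem.Set.ofList (xs.map pvNameGrouper ++ [pvNameGrouper x])
              = PySem.Set.add (PySem.Set.ofList (xs.map pvNameGrouper)) (pvNameGrouper x) by
          simp [PySem.Set.ofList_eq_foldl, List.foldl_append]]
        have hperm := PySem.List.sorted_perm (PySem.Set.ofList (xs.map pvNameGrouper)) (fun q => q) false
        by_cases hin : pvNameGrouper x ∈ pvK xs
        · have hinm : pvNameGrouper x ∈ xs.map pvNameGrouper := (pv_mem_K xs _).1 hin
          have hcont : PySem.Set.contains (PySem.Set.ofList (xs.map pvNameGrouper)) (pvNameGrouper x) = true := by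
            simp [PySem.Set.contains, PySem.Set.mem_ofList, hinm]
          rw [show PySem.Set.add (PySem.Set.ofList (xs.map pvNameGrouper)) (pvNameGrouper x)
                = PySem.Set.ofList (xs.map pvNameGrouper) from by
            unfold PySem.Set.add
            rw [hcont]
            simp]
          exact ((pv_insertKey_perm _ _ (pv_K_pairwise xs)).trans
            (by rw [if_pos hin]; exact hperm))
        · have hinm : pvNameGrouper x ∉ xs.map pvNameGrouper := fun h => hin ((pv_mem_K xs _).2 h)
          have hcont : PySem.Set.contains (PySem.Set.ofList (xs.map pvNameGrouper)) (pvNameGrouper x) = false := by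
            simp [PySem.Set.contains, PySem.Set.mem_ofList, hinm]
          rw [show PySem.Set.add (PySem.Set.ofList (xs.map pvNameGrouper)) (pvNameGrouper x)
                = PySem.Set.ofList (xs.map pvNameGrouper) ++ [pvNameGrouper x] from by
            unfold PySem.Set.add
            rw [hcont]
            simp]
          exact ((pv_insertKey_perm _ _ (pv_K_pairwise xs)).trans
            (by rw [if_neg hin]; exact hperm.append_right _))
      · exact pv_insertKey_pairwise _ _ (pv_K_pairwise xs)
    rw [hK]
    -- identify the new buckets
    congr 1
    funext q
    unfold pvF
    rw [List.filter_append]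
    by_cases hq : q = pvNameGrouper x
    · simp [hq]
    · have : (pvNameGrouper x == q) = false := by simp; exact fun e => hq e.symm
      simp [hq, this]

-- groupby of a key-bucketed concatenation yields one pair per key
lemma pv_groupby_flatMap (K : List String) (F : String → List (List String))
    (hp : K.Pairwise (· < ·))
    (hne : ∀ q ∈ K, F q ≠ [])
    (hkey : ∀ q ∈ K, ∀ nd ∈ F q, pvNameGrouper nd = q) :
    pvGroupbyA (K.flatMap F) = K.map (fun q => (q, F q)) := by
  induction K with
  | nil => simp [pvGroupbyA]
  | cons q K ih =>
    rw [List.pairwise_cons] at hp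
    obtain ⟨hq, hp'⟩ := hp
    obtain ⟨f0, fr, hfq⟩ : ∃ f0 fr, F q = f0 :: fr := by
      cases h : F q with
      | nil => exact absurd h (hne q (by simp))
      | cons a l => exact ⟨a, l, rfl⟩
    have hk0 : pvNameGrouper f0 = q := hkey q (by simp) f0 (by simp [hfq])
    rw [List.flatMap_cons, hfq, List.cons_append]
    rw [pvGroupbyA]
    have hfr : ∀ y ∈ fr, (pvNameGrouper y == pvNameGrouper f0) = true := by
      intro y hy
      have := hkey q (by simp) y (by simp [hfq, hy])
      simp [this, hk0]
    have hrest : ∀ y ∈ K.flatMap F, (pvNameGrouper y == pvNameGrouper f0) = false := by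
      intro y hy
      obtain ⟨r, hr, hyr⟩ := List.mem_flatMap.1 hy
      have := hkey r (by simp [hr]) y hyr
      simp [this, hk0]
      exact fun e => absurd (e ▸ hq r hr) (lt_irrefl _)
    rw [List.takeWhile_append_of_pos hfr, List.dropWhile_append_of_pos hfr]
    rw [show (K.flatMap F).takeWhile (fun y => pvNameGrouper y == pvNameGrouper f0) = [] by
      cases h : K.flatMap F with
      | nil => rfl
      | cons a l => simp [hrest a (by simp [h])]]
    rw [show (K.flatMap F).dropWhile (fun y => pvNameGrouper y == pvNameGrouper f0) = K.flatMap F by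
      cases h : K.flatMap F with
      | nil => rfl
      | cons a l => rw [← h]; rw [h, List.dropWhile_cons]; simp [hrest a (by simp [h])]]
    rw [ih hp' (fun r hr => hne r (by simp [hr])) (fun r hr => hkey r (by simp [hr]))]
    simp [hk0, hfq]

-- A's enumerate-fold, past the first element, is a plain fold over the tuples
lemma pv_enum_fold (fr : List (List String)) (s : Int) (hs : 1 ≤ s) (acc : String × PySem.Set String) :
    (PySem.List.enumerate fr s).foldl
      (fun (st : String × PySem.Set String) p =>
        if p.1 == 0 then
          (PySem.Str.join " " p.2, PySem.Set.update PySem.Set.empty p.2)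
        else
          p.2.foldl (fun (st2 : String × PySem.Set String) n =>
            if PySem.Set.contains st2.2 n then st2
            else (st2.1 ++ "/" ++ n, PySem.Set.add st2.2 n)) st) acc
    = fr.foldl
        (fun (st : String × PySem.Set String) nd =>
          nd.foldl (fun (st2 : String × PySem.Set String) n =>
            if PySem.Set.contains st2.2 n then st2
            else (st2.1 ++ "/" ++ n, PySem.Set.add st2.2 n)) st) acc := by
  induction fr generalizing s acc with
  | nil => rfl
  | cons f fr ih =>
    rw [PySem.List.enumerate_cons, List.foldl_cons, List.foldl_cons]
    have h0 : (s == 0) = false := by simp; omega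
    simp only [h0, Bool.false_eq_true, if_false]
    exact ih (s + 1) (by omega) _

-- a fold of token folds over tuples is a fold over the flattened token list
lemma pv_foldl_nested {α β : Type} (l : List (List α)) (g : β → α → β) (i : β) :
    l.foldl (fun st nd => nd.foldl g st) i = (l.flatMap (fun nd => nd)).foldl g i := by
  induction l generalizing i with
  | nil => rfl
  | cons nd l ih => simp [List.foldl_cons, ih]

-- '/'-join of a seeded list is the seeded left fold A's string building performs
lemma pv_join_cons (x : String) (l : List String) :
    PySem.Str.join "/" (x :: l) = l.foldl (fun a t => a ++ "/" ++ t) x := by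
  induction l generalizing x with
  | nil => apply String.toList_inj.mp; simp [PySem.Str.join, PySem.Chars.join_singleton]
  | cons y l ih =>
    rw [List.foldl_cons, ← ih (x ++ "/" ++ y)]
    apply String.toList_inj.mp
    cases l with
    | nil => simp [PySem.Str.join, PySem.Chars.join_singleton, PySem.Chars.join_cons_cons]
    | cons z l => simp [PySem.Str.join, PySem.Chars.join_cons_cons]

lemma pv_add_not_mem (S : PySem.Set String) (t : String) (h : PySem.Set.contains S t = false) :
    PySem.Set.add S t = S ++ [t] := by
  have hm : t ∉ S := fun hm => by rw [(PySem.Set.contains_iff S t).mpr hm] at h; cases h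
  simp [PySem.Set.add, hm]

lemma pv_contains_false (S : PySem.Set String) (x : String) (h : x ∉ S) :
    PySem.Set.contains S x = false := by
  cases hc : PySem.Set.contains S x
  · rfl
  · exact absurd ((PySem.Set.contains_iff S x).mp hc) h

-- the tokens the seen-set walk emits, given the tokens already seen
def pvNews (S : PySem.Set String) : List String → List String
  | [] => []
  | t :: ts =>
      if PySem.Set.contains S t then pvNews S ts else t :: pvNews (PySem.Set.add S t) ts

lemma pv_fold_news (ts : List String) (s : String) (S : PySem.Set String) :
    ts.foldl (fun (st2 : String × PySem.Set String) n =>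
        if PySem.Set.contains st2.2 n then st2
        else (st2.1 ++ "/" ++ n, PySem.Set.add st2.2 n)) (s, S)
      = ((pvNews S ts).foldl (fun a t => a ++ "/" ++ t) s, S ++ pvNews S ts) := by
  induction ts generalizing s S with
  | nil => simp [pvNews]
  | cons t ts ih =>
    rw [List.foldl_cons]
    by_cases h : PySem.Set.contains S t = true
    · simp only [pvNews, h, if_true]
      exact ih s S
    · have h' : PySem.Set.contains S t = false := by simpa using h
      simp only [pvNews, h', Bool.false_eq_true, if_false]
      rw [ih (s ++ "/" ++ t) (PySem.Set.add S t), pv_add_not_mem S t h']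
      simp [List.append_assoc]

lemma pv_foldl_add (ts : List String) (S : PySem.Set String) :
    ts.foldl PySem.Set.add S = S ++ pvNews S ts := by
  induction ts generalizing S with
  | nil => simp [pvNews]
  | cons t ts ih =>
    rw [List.foldl_cons]
    by_cases h : PySem.Set.contains S t = true
    · have hadd : PySem.Set.add S t = S := by
        simp [PySem.Set.add, (PySem.Set.contains_iff S t).mp h]
      simp only [pvNews, h, if_true, hadd]
      exact ih S
    · have h' : PySem.Set.contains S t = false := by simpa using h
      simp only [pvNews, h', Bool.false_eq_true, if_false]
      rw [ih (PySem.Set.add S t), pv_add_not_mem S t h']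
      simp [List.append_assoc]

lemma pv_ofList_news (ts : List String) :
    (PySem.Set.ofList ts : List String) = pvNews PySem.Set.empty ts := by
  rw [PySem.Set.ofList_eq_foldl, pv_foldl_add]
  rfl

lemma pv_news_not_mem (ts : List String) (S : PySem.Set String) :
    ∀ x ∈ pvNews S ts, x ∉ S := by
  induction ts generalizing S with
  | nil => simp [pvNews]
  | cons t ts ih =>
    by_cases h : PySem.Set.contains S t = true
    · simp only [pvNews, h, if_true]
      exact ih S
    · have h' : PySem.Set.contains S t = false := by simpa using h
      have htS : t ∉ S := fun hm => by
        rw [(PySem.Set.contains_iff S t).mpr hm] at h'; cases h'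
      simp only [pvNews, h', Bool.false_eq_true, if_false, List.mem_cons]
      rintro x (rfl | hx)
      · exact htS
      · intro hxS
        exact ih (PySem.Set.add S t) x hx (by rw [pv_add_not_mem S t h']; simp [hxS])

-- the emitted tokens w.r.t. a larger seen set are those w.r.t. a smaller one, filtered
lemma pv_news_filter (ts : List String) (S T : PySem.Set String)
    (hsub : ∀ x ∈ T, x ∈ S) :
    pvNews S ts = (pvNews T ts).filter (fun t => ! PySem.Set.contains S t) := by
  induction ts generalizing S T with
  | nil => simp [pvNews]
  | cons t ts ih =>
    by_cases hT : PySem.Set.contains T t = true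
    · have htT : t ∈ T := (PySem.Set.contains_iff T t).mp hT
      have hS : PySem.Set.contains S t = true := (PySem.Set.contains_iff S t).mpr (hsub t htT)
      simp only [pvNews, hT, hS, if_true]
      exact ih S T hsub
    · have hT' : PySem.Set.contains T t = false := by simpa using hT
      have haddT := pv_add_not_mem T t hT'
      by_cases hS : PySem.Set.contains S t = true
      · have htS : t ∈ S := (PySem.Set.contains_iff S t).mp hS
        simp only [pvNews, hT', hS, Bool.false_eq_true, if_false, if_true, List.filter_cons,
          Bool.not_true, Bool.false_eq_true]
        refine ih S (PySem.Set.add T t) ?_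
        intro x hx
        rw [haddT] at hx
        rcases List.mem_append.1 hx with hx | hx
        · exact hsub x hx
        · simp at hx; exact hx ▸ htS
      · have hS' : PySem.Set.contains S t = false := by simpa using hS
        have haddS := pv_add_not_mem S t hS'
        simp only [pvNews, hT', hS', Bool.false_eq_true, if_false, List.filter_cons,
          Bool.not_false, if_true]
        congr 1
        rw [ih (PySem.Set.add S t) (PySem.Set.add T t)
              (by intro x hx
                  rw [haddT] at hx; rw [haddS]
                  rcases List.mem_append.1 hx with hx | hx
                  · exact List.mem_append.2 (Or.inl (hsub x hx))
                  · exact List.mem_append.2 (Or.inr hx))]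
        refine List.filter_congr ?_
        intro x hx
        have hxT : x ∉ PySem.Set.add T t := pv_news_not_mem ts _ x hx
        have hxt : x ≠ t := by rw [haddT] at hxT; simp at hxT; exact fun e => hxT.2 e
        congr 1
        rw [haddS]
        by_cases hxS : x ∈ S
        · rw [(PySem.Set.contains_iff _ x).mpr (List.mem_append.2 (Or.inl hxS)),
              (PySem.Set.contains_iff S x).mpr hxS]
        · rw [pv_contains_false S x hxS,
              pv_contains_false (S ++ [t]) x
                (fun hm => by rcases List.mem_append.1 hm with hm | hm
                              · exact hxS hm
                              · simp at hm; exact hxt hm)]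

-- per nonempty group, A's and B's group strings agree
lemma pv_group_name_eq (q : String) (g : List (List String)) (hg : g ≠ []) :
    pvGroupNameA q g = pvGroupNameB g := by
  cases g with
  | nil => exact absurd rfl hg
  | cons f fr =>
    unfold pvGroupNameA pvGroupNameB
    rw [PySem.List.enumerate_cons, List.foldl_cons]
    simp only [BEq.rfl, if_true, zero_add]
    rw [pv_enum_fold fr 1 (by omega)]
    rw [pv_foldl_nested, pv_fold_news]
    simp only
    rw [pv_join_cons]
    congr 1
    rw [show PySem.Set.update PySem.Set.empty f = PySem.Set.ofList f from rfl]
    rw [pv_news_filter (fr.flatMap (fun nd => nd)) (PySem.Set.ofList f) PySem.Set.empty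
          (by intro x hx; simp [PySem.Set.empty] at hx)]
    rw [PySem.List.dedup_eq_ofList, pv_ofList_news, pv_ofList_news]

-- ===== VERDICT (by name: the statement is the Claim_ definition above) =====
theorem get_grouped_satellite_name_spec : Claim_equal_get_grouped_satellite_name := by
  intro sat_names pos _
  unfold Spec_get_grouped_satellite_name
  unfold get_grouped_satellite_name get_grouped_satellite_name_alt
  simp only [pv_tok_eq]
  rw [pv_sorted_flatMap,
      pv_groupby_flatMap (pvK sat_names) (pvF sat_names) (pv_K_pairwise sat_names)
        (pv_hne sat_names) (fun q _ => pv_hkey sat_names q)]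
  rw [show PySem.List.sorted (PySem.Set.ofList (sat_names.map pvNameGrouper)) (fun q => q) false
        = pvK sat_names from rfl]
  have hA := PySem.List.foldl_append_singleton_eq_map
    (fun (g : String × List (List String)) => pvGroupNameA g.1 g.2)
    ((pvK sat_names).map (fun q => (q, pvF sat_names q))) []
  have hB := PySem.List.foldl_append_singleton_eq_map
    (fun (k : String) => pvGroupNameB (sat_names.filter (fun nd => pvNameGrouper nd == k)))
    (pvK sat_names) []
  rw [hA, hB]
  simp only [List.nil_append, List.map_map]
  congr 2
  apply List.map_congr_left
  intro q hq
  simp only [Function.comp]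
  rw [show sat_names.filter (fun nd => pvNameGrouper nd == q) = pvF sat_names q from rfl]
  exact pv_group_name_eq q (pvF sat_names q) (pv_hne sat_names q hq)
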